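-- pv_equiv track=rewrite | github.com/tinkermonkey/documentation_robotics | scripts/utils/relationship_parser.py | _infer_layer_from_entity_type
-- ===== SOURCE A (Python) =====
-- def _infer_layer_from_entity_type(entity_type: str) -> str:
--     """Infer layer ID from entity type name.
--
--     Examples:
--         "ApplicationService" → "04-application"
--         "BusinessService" → "02-business"
--         "Goal" → "01-motivation"
--
--     Args:
--         entity_type: Entity type name
--
--     Returns:
--         Inferred layer ID
--     """
--     entity_lower = entity_type.lower()
--
--     if entity_lower.startswith("business"):
--         return "02-business"
--     elif entity_lower.startswith("security"):
--         return "03-security"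
--     elif entity_lower.startswith("application"):
--         return "04-application"
--     elif entity_lower.startswith("technology"):
--         return "05-technology"
--     elif entity_lower.startswith("api"):
--         return "06-api"
--     elif entity_lower.startswith("data") or entity_lower.startswith("schema"):
--         return "07-data-model"
--     elif entity_lower.startswith("table") or entity_lower.startswith("database"):
--         return "08-datastore"
--     elif entity_lower.startswith("ux") or entity_lower.startswith("experience") or entity_lower.startswith("screen"):
--         return "09-ux"
--     elif entity_lower.startswith("navigation") or entity_lower.startswith("route") or entity_lower.startswith("flow"):
--         return "10-navigation"
--     elif entity_lower.startswith("metric") or entity_lower.startswith("apm"):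
--         return "11-apm-observability"
--     elif entity_lower.startswith("test"):
--         return "12-testing"
--     elif any(x in entity_lower for x in ["goal", "value", "stakeholder", "requirement", "principle"]):
--         return "01-motivation"
--
--     return "unknown"
-- ===== SOURCE B (Python) =====
-- # First-character index: the prefix to check is found by hashing the first letter,
-- # so at most one small bucket (<=3 prefixes) is ever scanned instead of the whole chain.
-- # 'database' needs no entry: every string starting with "database" starts with "data"
-- # and therefore maps to "07-data-model", exactly as the original chain does.
-- _BY_FIRST = {
--     "b": [("business", "02-business")],
--     "s": [("security", "03-security"), ("schema", "07-data-model"), ("screen", "09-ux")],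
--     "a": [("application", "04-application"), ("api", "06-api"), ("apm", "11-apm-observability")],
--     "t": [("technology", "05-technology"), ("table", "08-datastore"), ("test", "12-testing")],
--     "d": [("data", "07-data-model")],
--     "u": [("ux", "09-ux")],
--     "e": [("experience", "09-ux")],
--     "n": [("navigation", "10-navigation")],
--     "r": [("route", "10-navigation")],
--     "f": [("flow", "10-navigation")],
--     "m": [("metric", "11-apm-observability")],
-- }
--
-- _MOTIVATION_WORDS = ["goal", "value", "stakeholder", "requirement", "principle"]
--
--
-- def _infer_layer_from_entity_type(entity_type: str) -> str:
--     s = entity_type.lower()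
--     for prefix, layer in _BY_FIRST.get(s[:1], []):
--         if s.startswith(prefix):
--             return layer
--     if any(w in s for w in _MOTIVATION_WORDS):
--         return "01-motivation"
--     return "unknown"
-- ===== Notes on version B (the rewrite author's own statement) =====
-- stated objective: alternative
-- what changed: Replaced the 12-branch if/elif chain of 17 startswith tests by a hash index keyed on the first character of the lowered name: the dict lookup selects the only bucket (at most 3 prefixes) that can match, the dead 'database' test (subsumed by 'data') disappears, and the motivation-keyword substring scan stays as the fallback.
import Mathlib
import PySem

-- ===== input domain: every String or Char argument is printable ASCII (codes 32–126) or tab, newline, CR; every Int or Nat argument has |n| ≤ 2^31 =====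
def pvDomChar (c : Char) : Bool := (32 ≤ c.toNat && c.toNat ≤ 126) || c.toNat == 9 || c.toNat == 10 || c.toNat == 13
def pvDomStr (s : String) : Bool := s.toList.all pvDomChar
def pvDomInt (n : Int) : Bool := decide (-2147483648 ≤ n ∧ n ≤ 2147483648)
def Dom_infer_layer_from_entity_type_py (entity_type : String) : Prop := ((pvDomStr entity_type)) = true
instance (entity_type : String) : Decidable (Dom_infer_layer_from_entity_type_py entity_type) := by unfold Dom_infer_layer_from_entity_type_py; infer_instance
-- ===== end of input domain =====

-- B replaces A's 12-branch if/elif chain by a first-character hash index: the first letter of the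
-- lowered name selects the (at most 3-entry) bucket of prefixes that could possibly match, so the
-- linear chain of 17 startswith tests disappears (objective: simpler dispatch, same behaviour).

-- ===== PORT A =====
def infer_layer_from_entity_type_py (entity_type : String) : String :=
  let entity_lower := PySem.Str.lower entity_type
  if PySem.Str.startswith entity_lower "business" then "02-business"
  else if PySem.Str.startswith entity_lower "security" then "03-security"
  else if PySem.Str.startswith entity_lower "application" then "04-application"
  else if PySem.Str.startswith entity_lower "technology" then "05-technology"
  else if PySem.Str.startswith entity_lower "api" then "06-api"
  else if PySem.Str.startswith entity_lower "data" || PySem.Str.startswith entity_lower "schema" then "07-data-model"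
  else if PySem.Str.startswith entity_lower "table" || PySem.Str.startswith entity_lower "database" then "08-datastore"
  else if PySem.Str.startswith entity_lower "ux" || PySem.Str.startswith entity_lower "experience" || PySem.Str.startswith entity_lower "screen" then "09-ux"
  else if PySem.Str.startswith entity_lower "navigation" || PySem.Str.startswith entity_lower "route" || PySem.Str.startswith entity_lower "flow" then "10-navigation"
  else if PySem.Str.startswith entity_lower "metric" || PySem.Str.startswith entity_lower "apm" then "11-apm-observability"
  else if PySem.Str.startswith entity_lower "test" then "12-testing"
  else if (["goal", "value", "stakeholder", "requirement", "principle"]).any (fun x => PySem.Str.isIn x entity_lower) then "01-motivation"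
  else "unknown"

-- ===== PORT B =====
def pvByFirst : PySem.Dict String (List (String × String)) := PySem.Dict.ofList
  [ ("b", [("business", "02-business")])
  , ("s", [("security", "03-security"), ("schema", "07-data-model"), ("screen", "09-ux")])
  , ("a", [("application", "04-application"), ("api", "06-api"), ("apm", "11-apm-observability")])
  , ("t", [("technology", "05-technology"), ("table", "08-datastore"), ("test", "12-testing")])
  , ("d", [("data", "07-data-model")])
  , ("u", [("ux", "09-ux")])
  , ("e", [("experience", "09-ux")])
  , ("n", [("navigation", "10-navigation")])
  , ("r", [("route", "10-navigation")])
  , ("f", [("flow", "10-navigation")])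
  , ("m", [("metric", "11-apm-observability")]) ]

def pvMotivationWords : List String := ["goal", "value", "stakeholder", "requirement", "principle"]

-- the 'for prefix, layer in bucket' loop with early return
def pvScanBucket (s : String) : List (String × String) → Option String
  | [] => none
  | (p, layer) :: rest =>
      if PySem.Str.startswith s p then some layer else pvScanBucket s rest

def infer_layer_from_entity_type_py_alt (entity_type : String) : String :=
  let s := PySem.Str.lower entity_type
  (pvScanBucket s (PySem.Dict.getD pvByFirst (PySem.Str.slice s none (some 1)) [])).getD
    (if pvMotivationWords.any (fun w => PySem.Str.isIn w s) then "01-motivation" else "unknown")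

-- ===== PRECONDITION & SPEC =====
def Spec_infer_layer_from_entity_type_py (entity_type : String) (out : String) : Prop := out = infer_layer_from_entity_type_py_alt entity_type
instance (entity_type : String) (out : String) : Decidable (Spec_infer_layer_from_entity_type_py entity_type out) := by unfold Spec_infer_layer_from_entity_type_py; infer_instance

-- ===== CLAIM (what is proved, stated in full; the proofs are below) =====
def Claim_equal_infer_layer_from_entity_type_py : Prop := ∀ (entity_type : String), Dom_infer_layer_from_entity_type_py entity_type → Spec_infer_layer_from_entity_type_py entity_type (infer_layer_from_entity_type_py entity_type)


-- ===== LEMMAS AND PROOFS =====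
theorem pvStrExt (a b : String) (h : a.toList = b.toList) : a = b := by
  have := congrArg String.ofList h
  simpa using this

theorem pvSwNil (t : String) (p : String) (h : t.toList = []) (hp : p.toList ≠ []) :
    PySem.Str.startswith t p = false := by
  rw [Bool.eq_false_iff]
  intro hsw
  rw [PySem.Str.startswith_eq, PySem.Chars.startswith_iff] at hsw
  rcases hsw with ⟨u, hu⟩
  rw [h] at hu
  exact hp (List.append_eq_nil_iff.mp hu).1

theorem pvSwHead (t : String) (c : Char) (rest : List Char) (h : t.toList = c :: rest)
    (p : String) (d : Char) (hd : p.toList.head? = some d) (hne : d ≠ c) :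
    PySem.Str.startswith t p = false := by
  rw [Bool.eq_false_iff]
  intro hsw
  rw [PySem.Str.startswith_eq, PySem.Chars.startswith_iff] at hsw
  rcases hsw with ⟨u, hu⟩
  rw [h] at hu
  cases hpl : p.toList with
  | nil => rw [hpl] at hd; simp at hd
  | cons x xs =>
      rw [hpl] at hd hu
      simp at hd hu
      exact hne (by rw [← hd]; exact hu.1)

theorem pvSwDatabase (t : String) (h : PySem.Str.startswith t "data" = false) :
    PySem.Str.startswith t "database" = false := by
  rw [Bool.eq_false_iff] at *
  intro hsw
  apply h
  rw [PySem.Str.startswith_eq, PySem.Chars.startswith_iff] at *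
  exact List.IsPrefix.trans (by decide) hsw

theorem pvKeyCons (t : String) (c : Char) (rest : List Char) (h : t.toList = c :: rest) :
    PySem.Str.slice t none (some 1) = String.ofList [c] := by
  apply pvStrExt
  rw [PySem.Str.toList_slice]
  rw [h]
  simp [PySem.Chars.slice_eq_listSlice, PySem.List.slice_to]

theorem pvKeyNil (t : String) (h : t.toList = []) :
    PySem.Str.slice t none (some 1) = "" := by
  apply pvStrExt
  rw [PySem.Str.toList_slice]
  rw [h]
  simp [PySem.Chars.slice_eq_listSlice, PySem.List.slice_to]

theorem pvBeqKeyFalse (s : String) (d c : Char) (hs : s.toList = [d]) (h : ¬ c = d) :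
    (s == String.ofList [c]) = false := by
  simp only [beq_eq_false_iff_ne]
  intro he
  apply h
  have := congrArg String.toList he
  rw [hs] at this
  simpa using this.symm

theorem pvGetD_ite (c : Prop) [Decidable c] (x e : String) (o : Option String) :
    (if c then some x else o).getD e = if c then x else o.getD e := by
  split_ifs <;> rfl

-- ===== VERDICT (by name: the statement is the Claim_ definition above) =====
set_option maxHeartbeats 1000000 in
theorem infer_layer_from_entity_type_py_spec : Claim_equal_infer_layer_from_entity_type_py := by
  intro entity_type _
  unfold Spec_infer_layer_from_entity_type_py infer_layer_from_entity_type_py infer_layer_from_entity_type_py_alt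
  dsimp only
  rcases h : (PySem.Str.lower entity_type).toList with _ | ⟨c, rest⟩
  · rw [pvKeyNil _ h]
    have hbk : PySem.Dict.getD pvByFirst "" [] = [] := by decide
    rw [hbk]
    simp only [pvScanBucket, Bool.or_false, Bool.false_or, Bool.false_eq_true, if_false, if_true, Option.getD_none, Option.getD_some, pvGetD_ite, pvMotivationWords,
      pvSwNil _ "business" h (by decide),
      pvSwNil _ "security" h (by decide),
      pvSwNil _ "application" h (by decide),
      pvSwNil _ "technology" h (by decide),
      pvSwNil _ "api" h (by decide),
      pvSwNil _ "data" h (by decide),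
      pvSwNil _ "schema" h (by decide),
      pvSwNil _ "table" h (by decide),
      pvSwNil _ "database" h (by decide),
      pvSwNil _ "ux" h (by decide),
      pvSwNil _ "experience" h (by decide),
      pvSwNil _ "screen" h (by decide),
      pvSwNil _ "navigation" h (by decide),
      pvSwNil _ "route" h (by decide),
      pvSwNil _ "flow" h (by decide),
      pvSwNil _ "metric" h (by decide),
      pvSwNil _ "apm" h (by decide),
      pvSwNil _ "test" h (by decide)]
    rfl
  · by_cases hcb : c = 'b'
    · subst hcb
      rw [pvKeyCons _ 'b' rest h]
      have hbk : PySem.Dict.getD pvByFirst (String.ofList ['b']) [] = [("business", "02-business")] := by decide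
      rw [hbk]
      simp only [pvScanBucket, Bool.or_false, Bool.false_or, Bool.false_eq_true, if_false, if_true, Option.getD_none, Option.getD_some, pvGetD_ite, pvMotivationWords,
        pvSwHead _ 'b' rest h "security" 's' rfl (by decide),
        pvSwHead _ 'b' rest h "application" 'a' rfl (by decide),
        pvSwHead _ 'b' rest h "technology" 't' rfl (by decide),
        pvSwHead _ 'b' rest h "api" 'a' rfl (by decide),
        pvSwHead _ 'b' rest h "data" 'd' rfl (by decide),
        pvSwHead _ 'b' rest h "schema" 's' rfl (by decide),
        pvSwHead _ 'b' rest h "table" 't' rfl (by decide),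
        pvSwHead _ 'b' rest h "database" 'd' rfl (by decide),
        pvSwHead _ 'b' rest h "ux" 'u' rfl (by decide),
        pvSwHead _ 'b' rest h "experience" 'e' rfl (by decide),
        pvSwHead _ 'b' rest h "screen" 's' rfl (by decide),
        pvSwHead _ 'b' rest h "navigation" 'n' rfl (by decide),
        pvSwHead _ 'b' rest h "route" 'r' rfl (by decide),
        pvSwHead _ 'b' rest h "flow" 'f' rfl (by decide),
        pvSwHead _ 'b' rest h "metric" 'm' rfl (by decide),
        pvSwHead _ 'b' rest h "apm" 'a' rfl (by decide),
        pvSwHead _ 'b' rest h "test" 't' rfl (by decide)]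
      rfl
    by_cases hcs : c = 's'
    · subst hcs
      rw [pvKeyCons _ 's' rest h]
      have hbk : PySem.Dict.getD pvByFirst (String.ofList ['s']) [] = [("security", "03-security"), ("schema", "07-data-model"), ("screen", "09-ux")] := by decide
      rw [hbk]
      simp only [pvScanBucket, Bool.or_false, Bool.false_or, Bool.false_eq_true, if_false, if_true, Option.getD_none, Option.getD_some, pvGetD_ite, pvMotivationWords,
        pvSwHead _ 's' rest h "business" 'b' rfl (by decide),
        pvSwHead _ 's' rest h "application" 'a' rfl (by decide),
        pvSwHead _ 's' rest h "technology" 't' rfl (by decide),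
        pvSwHead _ 's' rest h "api" 'a' rfl (by decide),
        pvSwHead _ 's' rest h "data" 'd' rfl (by decide),
        pvSwHead _ 's' rest h "table" 't' rfl (by decide),
        pvSwHead _ 's' rest h "database" 'd' rfl (by decide),
        pvSwHead _ 's' rest h "ux" 'u' rfl (by decide),
        pvSwHead _ 's' rest h "experience" 'e' rfl (by decide),
        pvSwHead _ 's' rest h "navigation" 'n' rfl (by decide),
        pvSwHead _ 's' rest h "route" 'r' rfl (by decide),
        pvSwHead _ 's' rest h "flow" 'f' rfl (by decide),
        pvSwHead _ 's' rest h "metric" 'm' rfl (by decide),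
        pvSwHead _ 's' rest h "apm" 'a' rfl (by decide),
        pvSwHead _ 's' rest h "test" 't' rfl (by decide)]
      rfl
    by_cases hca : c = 'a'
    · subst hca
      rw [pvKeyCons _ 'a' rest h]
      have hbk : PySem.Dict.getD pvByFirst (String.ofList ['a']) [] = [("application", "04-application"), ("api", "06-api"), ("apm", "11-apm-observability")] := by decide
      rw [hbk]
      simp only [pvScanBucket, Bool.or_false, Bool.false_or, Bool.false_eq_true, if_false, if_true, Option.getD_none, Option.getD_some, pvGetD_ite, pvMotivationWords,
        pvSwHead _ 'a' rest h "business" 'b' rfl (by decide),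
        pvSwHead _ 'a' rest h "security" 's' rfl (by decide),
        pvSwHead _ 'a' rest h "technology" 't' rfl (by decide),
        pvSwHead _ 'a' rest h "data" 'd' rfl (by decide),
        pvSwHead _ 'a' rest h "schema" 's' rfl (by decide),
        pvSwHead _ 'a' rest h "table" 't' rfl (by decide),
        pvSwHead _ 'a' rest h "database" 'd' rfl (by decide),
        pvSwHead _ 'a' rest h "ux" 'u' rfl (by decide),
        pvSwHead _ 'a' rest h "experience" 'e' rfl (by decide),
        pvSwHead _ 'a' rest h "screen" 's' rfl (by decide),
        pvSwHead _ 'a' rest h "navigation" 'n' rfl (by decide),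
        pvSwHead _ 'a' rest h "route" 'r' rfl (by decide),
        pvSwHead _ 'a' rest h "flow" 'f' rfl (by decide),
        pvSwHead _ 'a' rest h "metric" 'm' rfl (by decide),
        pvSwHead _ 'a' rest h "test" 't' rfl (by decide)]
      rfl
    by_cases hct : c = 't'
    · subst hct
      rw [pvKeyCons _ 't' rest h]
      have hbk : PySem.Dict.getD pvByFirst (String.ofList ['t']) [] = [("technology", "05-technology"), ("table", "08-datastore"), ("test", "12-testing")] := by decide
      rw [hbk]
      simp only [pvScanBucket, Bool.or_false, Bool.false_or, Bool.false_eq_true, if_false, if_true, Option.getD_none, Option.getD_some, pvGetD_ite, pvMotivationWords,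
        pvSwHead _ 't' rest h "business" 'b' rfl (by decide),
        pvSwHead _ 't' rest h "security" 's' rfl (by decide),
        pvSwHead _ 't' rest h "application" 'a' rfl (by decide),
        pvSwHead _ 't' rest h "api" 'a' rfl (by decide),
        pvSwHead _ 't' rest h "data" 'd' rfl (by decide),
        pvSwHead _ 't' rest h "schema" 's' rfl (by decide),
        pvSwHead _ 't' rest h "database" 'd' rfl (by decide),
        pvSwHead _ 't' rest h "ux" 'u' rfl (by decide),
        pvSwHead _ 't' rest h "experience" 'e' rfl (by decide),
        pvSwHead _ 't' rest h "screen" 's' rfl (by decide),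
        pvSwHead _ 't' rest h "navigation" 'n' rfl (by decide),
        pvSwHead _ 't' rest h "route" 'r' rfl (by decide),
        pvSwHead _ 't' rest h "flow" 'f' rfl (by decide),
        pvSwHead _ 't' rest h "metric" 'm' rfl (by decide),
        pvSwHead _ 't' rest h "apm" 'a' rfl (by decide)]
      rfl
    by_cases hcd : c = 'd'
    · subst hcd
      rw [pvKeyCons _ 'd' rest h]
      have hbk : PySem.Dict.getD pvByFirst (String.ofList ['d']) [] = [("data", "07-data-model")] := by decide
      rw [hbk]
      cases hdata : PySem.Str.startswith (PySem.Str.lower entity_type) "data" with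
      | false =>
          simp only [pvScanBucket, Bool.or_false, Bool.false_or, Bool.false_eq_true, if_false, if_true, Option.getD_none, Option.getD_some, pvGetD_ite, hdata, pvSwDatabase _ hdata, pvGetD_ite, pvMotivationWords,
            pvSwHead _ 'd' rest h "business" 'b' rfl (by decide),
            pvSwHead _ 'd' rest h "security" 's' rfl (by decide),
            pvSwHead _ 'd' rest h "application" 'a' rfl (by decide),
            pvSwHead _ 'd' rest h "technology" 't' rfl (by decide),
            pvSwHead _ 'd' rest h "api" 'a' rfl (by decide),
            pvSwHead _ 'd' rest h "schema" 's' rfl (by decide),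
            pvSwHead _ 'd' rest h "table" 't' rfl (by decide),
            pvSwHead _ 'd' rest h "ux" 'u' rfl (by decide),
            pvSwHead _ 'd' rest h "experience" 'e' rfl (by decide),
            pvSwHead _ 'd' rest h "screen" 's' rfl (by decide),
            pvSwHead _ 'd' rest h "navigation" 'n' rfl (by decide),
            pvSwHead _ 'd' rest h "route" 'r' rfl (by decide),
            pvSwHead _ 'd' rest h "flow" 'f' rfl (by decide),
            pvSwHead _ 'd' rest h "metric" 'm' rfl (by decide),
            pvSwHead _ 'd' rest h "apm" 'a' rfl (by decide),
            pvSwHead _ 'd' rest h "test" 't' rfl (by decide)]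
          rfl
      | true =>
          simp only [pvScanBucket, Bool.or_false, Bool.false_or, Bool.false_eq_true, if_false, if_true, Option.getD_none, Option.getD_some, pvGetD_ite, hdata, pvGetD_ite, pvMotivationWords,
            pvSwHead _ 'd' rest h "business" 'b' rfl (by decide),
            pvSwHead _ 'd' rest h "security" 's' rfl (by decide),
            pvSwHead _ 'd' rest h "application" 'a' rfl (by decide),
            pvSwHead _ 'd' rest h "technology" 't' rfl (by decide),
            pvSwHead _ 'd' rest h "api" 'a' rfl (by decide),
            pvSwHead _ 'd' rest h "schema" 's' rfl (by decide),
            pvSwHead _ 'd' rest h "table" 't' rfl (by decide),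
            pvSwHead _ 'd' rest h "ux" 'u' rfl (by decide),
            pvSwHead _ 'd' rest h "experience" 'e' rfl (by decide),
            pvSwHead _ 'd' rest h "screen" 's' rfl (by decide),
            pvSwHead _ 'd' rest h "navigation" 'n' rfl (by decide),
            pvSwHead _ 'd' rest h "route" 'r' rfl (by decide),
            pvSwHead _ 'd' rest h "flow" 'f' rfl (by decide),
            pvSwHead _ 'd' rest h "metric" 'm' rfl (by decide),
            pvSwHead _ 'd' rest h "apm" 'a' rfl (by decide),
            pvSwHead _ 'd' rest h "test" 't' rfl (by decide)]
    by_cases hcu : c = 'u'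
    · subst hcu
      rw [pvKeyCons _ 'u' rest h]
      have hbk : PySem.Dict.getD pvByFirst (String.ofList ['u']) [] = [("ux", "09-ux")] := by decide
      rw [hbk]
      simp only [pvScanBucket, Bool.or_false, Bool.false_or, Bool.false_eq_true, if_false, if_true, Option.getD_none, Option.getD_some, pvGetD_ite, pvMotivationWords,
        pvSwHead _ 'u' rest h "business" 'b' rfl (by decide),
        pvSwHead _ 'u' rest h "security" 's' rfl (by decide),
        pvSwHead _ 'u' rest h "application" 'a' rfl (by decide),
        pvSwHead _ 'u' rest h "technology" 't' rfl (by decide),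
        pvSwHead _ 'u' rest h "api" 'a' rfl (by decide),
        pvSwHead _ 'u' rest h "data" 'd' rfl (by decide),
        pvSwHead _ 'u' rest h "schema" 's' rfl (by decide),
        pvSwHead _ 'u' rest h "table" 't' rfl (by decide),
        pvSwHead _ 'u' rest h "database" 'd' rfl (by decide),
        pvSwHead _ 'u' rest h "experience" 'e' rfl (by decide),
        pvSwHead _ 'u' rest h "screen" 's' rfl (by decide),
        pvSwHead _ 'u' rest h "navigation" 'n' rfl (by decide),
        pvSwHead _ 'u' rest h "route" 'r' rfl (by decide),
        pvSwHead _ 'u' rest h "flow" 'f' rfl (by decide),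
        pvSwHead _ 'u' rest h "metric" 'm' rfl (by decide),
        pvSwHead _ 'u' rest h "apm" 'a' rfl (by decide),
        pvSwHead _ 'u' rest h "test" 't' rfl (by decide)]
      rfl
    by_cases hce : c = 'e'
    · subst hce
      rw [pvKeyCons _ 'e' rest h]
      have hbk : PySem.Dict.getD pvByFirst (String.ofList ['e']) [] = [("experience", "09-ux")] := by decide
      rw [hbk]
      simp only [pvScanBucket, Bool.or_false, Bool.false_or, Bool.false_eq_true, if_false, if_true, Option.getD_none, Option.getD_some, pvGetD_ite, pvMotivationWords,
        pvSwHead _ 'e' rest h "business" 'b' rfl (by decide),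
        pvSwHead _ 'e' rest h "security" 's' rfl (by decide),
        pvSwHead _ 'e' rest h "application" 'a' rfl (by decide),
        pvSwHead _ 'e' rest h "technology" 't' rfl (by decide),
        pvSwHead _ 'e' rest h "api" 'a' rfl (by decide),
        pvSwHead _ 'e' rest h "data" 'd' rfl (by decide),
        pvSwHead _ 'e' rest h "schema" 's' rfl (by decide),
        pvSwHead _ 'e' rest h "table" 't' rfl (by decide),
        pvSwHead _ 'e' rest h "database" 'd' rfl (by decide),
        pvSwHead _ 'e' rest h "ux" 'u' rfl (by decide),
        pvSwHead _ 'e' rest h "screen" 's' rfl (by decide),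
        pvSwHead _ 'e' rest h "navigation" 'n' rfl (by decide),
        pvSwHead _ 'e' rest h "route" 'r' rfl (by decide),
        pvSwHead _ 'e' rest h "flow" 'f' rfl (by decide),
        pvSwHead _ 'e' rest h "metric" 'm' rfl (by decide),
        pvSwHead _ 'e' rest h "apm" 'a' rfl (by decide),
        pvSwHead _ 'e' rest h "test" 't' rfl (by decide)]
      rfl
    by_cases hcn : c = 'n'
    · subst hcn
      rw [pvKeyCons _ 'n' rest h]
      have hbk : PySem.Dict.getD pvByFirst (String.ofList ['n']) [] = [("navigation", "10-navigation")] := by decide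
      rw [hbk]
      simp only [pvScanBucket, Bool.or_false, Bool.false_or, Bool.false_eq_true, if_false, if_true, Option.getD_none, Option.getD_some, pvGetD_ite, pvMotivationWords,
        pvSwHead _ 'n' rest h "business" 'b' rfl (by decide),
        pvSwHead _ 'n' rest h "security" 's' rfl (by decide),
        pvSwHead _ 'n' rest h "application" 'a' rfl (by decide),
        pvSwHead _ 'n' rest h "technology" 't' rfl (by decide),
        pvSwHead _ 'n' rest h "api" 'a' rfl (by decide),
        pvSwHead _ 'n' rest h "data" 'd' rfl (by decide),
        pvSwHead _ 'n' rest h "schema" 's' rfl (by decide),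
        pvSwHead _ 'n' rest h "table" 't' rfl (by decide),
        pvSwHead _ 'n' rest h "database" 'd' rfl (by decide),
        pvSwHead _ 'n' rest h "ux" 'u' rfl (by decide),
        pvSwHead _ 'n' rest h "experience" 'e' rfl (by decide),
        pvSwHead _ 'n' rest h "screen" 's' rfl (by decide),
        pvSwHead _ 'n' rest h "route" 'r' rfl (by decide),
        pvSwHead _ 'n' rest h "flow" 'f' rfl (by decide),
        pvSwHead _ 'n' rest h "metric" 'm' rfl (by decide),
        pvSwHead _ 'n' rest h "apm" 'a' rfl (by decide),
        pvSwHead _ 'n' rest h "test" 't' rfl (by decide)]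
      rfl
    by_cases hcr : c = 'r'
    · subst hcr
      rw [pvKeyCons _ 'r' rest h]
      have hbk : PySem.Dict.getD pvByFirst (String.ofList ['r']) [] = [("route", "10-navigation")] := by decide
      rw [hbk]
      simp only [pvScanBucket, Bool.or_false, Bool.false_or, Bool.false_eq_true, if_false, if_true, Option.getD_none, Option.getD_some, pvGetD_ite, pvMotivationWords,
        pvSwHead _ 'r' rest h "business" 'b' rfl (by decide),
        pvSwHead _ 'r' rest h "security" 's' rfl (by decide),
        pvSwHead _ 'r' rest h "application" 'a' rfl (by decide),
        pvSwHead _ 'r' rest h "technology" 't' rfl (by decide),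
        pvSwHead _ 'r' rest h "api" 'a' rfl (by decide),
        pvSwHead _ 'r' rest h "data" 'd' rfl (by decide),
        pvSwHead _ 'r' rest h "schema" 's' rfl (by decide),
        pvSwHead _ 'r' rest h "table" 't' rfl (by decide),
        pvSwHead _ 'r' rest h "database" 'd' rfl (by decide),
        pvSwHead _ 'r' rest h "ux" 'u' rfl (by decide),
        pvSwHead _ 'r' rest h "experience" 'e' rfl (by decide),
        pvSwHead _ 'r' rest h "screen" 's' rfl (by decide),
        pvSwHead _ 'r' rest h "navigation" 'n' rfl (by decide),
        pvSwHead _ 'r' rest h "flow" 'f' rfl (by decide),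
        pvSwHead _ 'r' rest h "metric" 'm' rfl (by decide),
        pvSwHead _ 'r' rest h "apm" 'a' rfl (by decide),
        pvSwHead _ 'r' rest h "test" 't' rfl (by decide)]
      rfl
    by_cases hcf : c = 'f'
    · subst hcf
      rw [pvKeyCons _ 'f' rest h]
      have hbk : PySem.Dict.getD pvByFirst (String.ofList ['f']) [] = [("flow", "10-navigation")] := by decide
      rw [hbk]
      simp only [pvScanBucket, Bool.or_false, Bool.false_or, Bool.false_eq_true, if_false, if_true, Option.getD_none, Option.getD_some, pvGetD_ite, pvMotivationWords,
        pvSwHead _ 'f' rest h "business" 'b' rfl (by decide),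
        pvSwHead _ 'f' rest h "security" 's' rfl (by decide),
        pvSwHead _ 'f' rest h "application" 'a' rfl (by decide),
        pvSwHead _ 'f' rest h "technology" 't' rfl (by decide),
        pvSwHead _ 'f' rest h "api" 'a' rfl (by decide),
        pvSwHead _ 'f' rest h "data" 'd' rfl (by decide),
        pvSwHead _ 'f' rest h "schema" 's' rfl (by decide),
        pvSwHead _ 'f' rest h "table" 't' rfl (by decide),
        pvSwHead _ 'f' rest h "database" 'd' rfl (by decide),
        pvSwHead _ 'f' rest h "ux" 'u' rfl (by decide),
        pvSwHead _ 'f' rest h "experience" 'e' rfl (by decide),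
        pvSwHead _ 'f' rest h "screen" 's' rfl (by decide),
        pvSwHead _ 'f' rest h "navigation" 'n' rfl (by decide),
        pvSwHead _ 'f' rest h "route" 'r' rfl (by decide),
        pvSwHead _ 'f' rest h "metric" 'm' rfl (by decide),
        pvSwHead _ 'f' rest h "apm" 'a' rfl (by decide),
        pvSwHead _ 'f' rest h "test" 't' rfl (by decide)]
      rfl
    by_cases hcm : c = 'm'
    · subst hcm
      rw [pvKeyCons _ 'm' rest h]
      have hbk : PySem.Dict.getD pvByFirst (String.ofList ['m']) [] = [("metric", "11-apm-observability")] := by decide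
      rw [hbk]
      simp only [pvScanBucket, Bool.or_false, Bool.false_or, Bool.false_eq_true, if_false, if_true, Option.getD_none, Option.getD_some, pvGetD_ite, pvMotivationWords,
        pvSwHead _ 'm' rest h "business" 'b' rfl (by decide),
        pvSwHead _ 'm' rest h "security" 's' rfl (by decide),
        pvSwHead _ 'm' rest h "application" 'a' rfl (by decide),
        pvSwHead _ 'm' rest h "technology" 't' rfl (by decide),
        pvSwHead _ 'm' rest h "api" 'a' rfl (by decide),
        pvSwHead _ 'm' rest h "data" 'd' rfl (by decide),
        pvSwHead _ 'm' rest h "schema" 's' rfl (by decide),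
        pvSwHead _ 'm' rest h "table" 't' rfl (by decide),
        pvSwHead _ 'm' rest h "database" 'd' rfl (by decide),
        pvSwHead _ 'm' rest h "ux" 'u' rfl (by decide),
        pvSwHead _ 'm' rest h "experience" 'e' rfl (by decide),
        pvSwHead _ 'm' rest h "screen" 's' rfl (by decide),
        pvSwHead _ 'm' rest h "navigation" 'n' rfl (by decide),
        pvSwHead _ 'm' rest h "route" 'r' rfl (by decide),
        pvSwHead _ 'm' rest h "flow" 'f' rfl (by decide),
        pvSwHead _ 'm' rest h "apm" 'a' rfl (by decide),
        pvSwHead _ 'm' rest h "test" 't' rfl (by decide)]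
      rfl
    -- default: c heads no bucket, so every prefix test of A is false and B's bucket is empty
    rw [pvKeyCons _ c rest h]
    have hitems : pvByFirst.items = [ ("b", [("business", "02-business")]), ("s", [("security", "03-security"), ("schema", "07-data-model"), ("screen", "09-ux")]), ("a", [("application", "04-application"), ("api", "06-api"), ("apm", "11-apm-observability")]), ("t", [("technology", "05-technology"), ("table", "08-datastore"), ("test", "12-testing")]), ("d", [("data", "07-data-model")]), ("u", [("ux", "09-ux")]), ("e", [("experience", "09-ux")]), ("n", [("navigation", "10-navigation")]), ("r", [("route", "10-navigation")]), ("f", [("flow", "10-navigation")]), ("m", [("metric", "11-apm-observability")]) ] := by decide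
    have hnc : pvByFirst.contains (String.ofList [c]) = false := by
      unfold PySem.Dict.contains
      rw [hitems]
      simp [pvBeqKeyFalse "b" 'b' c (by decide) hcb, pvBeqKeyFalse "s" 's' c (by decide) hcs, pvBeqKeyFalse "a" 'a' c (by decide) hca, pvBeqKeyFalse "t" 't' c (by decide) hct, pvBeqKeyFalse "d" 'd' c (by decide) hcd, pvBeqKeyFalse "u" 'u' c (by decide) hcu, pvBeqKeyFalse "e" 'e' c (by decide) hce, pvBeqKeyFalse "n" 'n' c (by decide) hcn, pvBeqKeyFalse "r" 'r' c (by decide) hcr, pvBeqKeyFalse "f" 'f' c (by decide) hcf, pvBeqKeyFalse "m" 'm' c (by decide) hcm]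
    rw [PySem.Dict.getD_of_not_contains _ _ hnc]
    simp only [pvScanBucket, Bool.or_false, Bool.false_or, Bool.false_eq_true, if_false, if_true, Option.getD_none, Option.getD_some, pvGetD_ite, pvMotivationWords,
      pvSwHead _ c rest h "business" 'b' rfl (fun he => hcb he.symm),
      pvSwHead _ c rest h "security" 's' rfl (fun he => hcs he.symm),
      pvSwHead _ c rest h "application" 'a' rfl (fun he => hca he.symm),
      pvSwHead _ c rest h "technology" 't' rfl (fun he => hct he.symm),
      pvSwHead _ c rest h "api" 'a' rfl (fun he => hca he.symm),
      pvSwHead _ c rest h "data" 'd' rfl (fun he => hcd he.symm),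
      pvSwHead _ c rest h "schema" 's' rfl (fun he => hcs he.symm),
      pvSwHead _ c rest h "table" 't' rfl (fun he => hct he.symm),
      pvSwHead _ c rest h "database" 'd' rfl (fun he => hcd he.symm),
      pvSwHead _ c rest h "ux" 'u' rfl (fun he => hcu he.symm),
      pvSwHead _ c rest h "experience" 'e' rfl (fun he => hce he.symm),
      pvSwHead _ c rest h "screen" 's' rfl (fun he => hcs he.symm),
      pvSwHead _ c rest h "navigation" 'n' rfl (fun he => hcn he.symm),
      pvSwHead _ c rest h "route" 'r' rfl (fun he => hcr he.symm),
      pvSwHead _ c rest h "flow" 'f' rfl (fun he => hcf he.symm),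
      pvSwHead _ c rest h "metric" 'm' rfl (fun he => hcm he.symm),
      pvSwHead _ c rest h "apm" 'a' rfl (fun he => hca he.symm),
      pvSwHead _ c rest h "test" 't' rfl (fun he => hct he.symm)]
    rfl
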